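-- pv_equiv track=rewrite | github.com/MoerAI/algorithm | OSAM/tshirts.py | solution
-- ===== SOURCE A (Python) =====
-- from typing import List
--
-- def solution(people: List[int], tshirts: List[int]) -> int:
--     people.sort()
--     tshirts.sort()
--     answer = 0
--     for person in people:
--         for shirt in tshirts:
--             if(person <= shirt):
--                 answer += 1
--                 tshirts.remove(shirt)
--                 break
--     return answer
-- ===== SOURCE B (Python) =====
-- def solution(people, tshirts):
--     ps = sorted(people)
--     ts = sorted(tshirts)
--     answer = 0
--     j = 0
--     for person in ps:
--         while j < len(ts) and ts[j] < person:
--             j += 1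
--         if j < len(ts):
--             answer += 1
--             j += 1
--     return answer
-- ===== Notes on version B (the rewrite author's own statement) =====
-- stated objective: faster
-- what changed: Replaces the per-person linear scan with list.remove on the shirt list by a single two-pointer sweep over the two sorted lists (and B does not mutate its arguments, unlike A which sorts and shrinks them in place).
import Mathlib
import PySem

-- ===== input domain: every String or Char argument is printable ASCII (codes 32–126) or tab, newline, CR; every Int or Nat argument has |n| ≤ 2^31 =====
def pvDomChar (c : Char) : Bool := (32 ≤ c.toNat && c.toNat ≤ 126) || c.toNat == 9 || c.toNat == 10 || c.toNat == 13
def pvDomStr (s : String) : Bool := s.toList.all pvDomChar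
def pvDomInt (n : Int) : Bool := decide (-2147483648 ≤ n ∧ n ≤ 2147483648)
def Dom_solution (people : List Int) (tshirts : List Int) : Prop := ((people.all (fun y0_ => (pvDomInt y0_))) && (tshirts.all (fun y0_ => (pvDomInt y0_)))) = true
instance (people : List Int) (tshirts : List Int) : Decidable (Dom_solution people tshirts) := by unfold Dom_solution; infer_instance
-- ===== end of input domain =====

-- B replaces A's per-person scan-and-remove over the shirt list by a two-pointer
-- sweep over the two sorted lists (asymptotically faster). A sorts and shrinks its
-- arguments in place; B does not mutate them — the equivalence proved is about the
-- return value only.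

-- ===== PORT A =====
-- inner 'for shirt in tshirts: if person <= shirt: … break': first shirt with person ≤ shirt
def aFind (person : Int) : List Int → Option Int
  | [] => none
  | t :: rest => if person ≤ t then some t else aFind person rest

-- outer 'for person in people' with state (tshirts, answer);
-- 'tshirts.remove(shirt)' = PySem.List.remove? (first occurrence of the value)
def aLoop : List Int → List Int → Int → Int
  | [], _, ans => ans
  | p :: ps, ts, ans =>
    match aFind p ts with
    | none => aLoop ps ts ans
    | some s => aLoop ps ((PySem.List.remove? ts s).getD ts) (ans + 1)

def solution (people : List Int) (tshirts : List Int) : Int :=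
  aLoop (PySem.List.sorted people (fun x => x) false)
        (PySem.List.sorted tshirts (fun x => x) false) 0

-- ===== PORT B =====
-- two-pointer sweep: the while loop advancing j is dropWhile on the remaining suffix
def bLoop : List Int → List Int → Int
  | [], _ => 0
  | p :: ps, ts =>
    match ts.dropWhile (fun t => decide (t < p)) with
    | [] => bLoop ps []
    | _ :: rest => 1 + bLoop ps rest

def solution_alt (people : List Int) (tshirts : List Int) : Int :=
  bLoop (PySem.List.sorted people (fun x => x) false)
        (PySem.List.sorted tshirts (fun x => x) false)

-- ===== PRECONDITION & SPEC =====
def Spec_solution (people : List Int) (tshirts : List Int) (out : Int) : Prop := out = solution_alt people tshirts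
instance (people : List Int) (tshirts : List Int) (out : Int) : Decidable (Spec_solution people tshirts out) := by unfold Spec_solution; infer_instance

-- ===== CLAIM (what is proved, stated in full; the proofs are below) =====
def Claim_equal_solution : Prop := ∀ (people : List Int) (tshirts : List Int), Dom_solution people tshirts → Spec_solution people tshirts (solution people tshirts)

-- ===== LEMMAS AND PROOFS =====

-- aFind returns the head of the suffix past all shirts < person
theorem aFind_eq_head_dropWhile (p : Int) (ts : List Int) :
    aFind p ts = (ts.dropWhile (fun t => decide (t < p))).head? := by
  induction ts with
  | nil => rfl
  | cons t rest ih =>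
    by_cases h : p ≤ t
    · simp [aFind, List.dropWhile, h, not_lt.mpr h]
    · simp [aFind, List.dropWhile, h, lt_of_not_ge h, ih]

-- remove? removes the first occurrence; if v is not in the prefix, it removes past it
theorem remove?_append_of_not_mem (l1 : List Int) (v : Int) (r : List Int) (h : v ∉ l1) :
    PySem.List.remove? (l1 ++ v :: r) v = some (l1 ++ r) := by
  induction l1 with
  | nil => simp [PySem.List.remove?_cons_self]
  | cons x xs ih =>
    simp only [List.mem_cons, not_or] at h
    rw [List.cons_append, PySem.List.remove?_cons_of_ne _ (Ne.symm h.1), ih h.2]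
    rfl

-- Main invariant: A's remaining shirt list is B's suffix preceded by junk shirts
-- that are smaller than every remaining person.
theorem aLoop_eq_bLoop (ps : List Int) : ∀ (junk ts : List Int) (ans : Int),
    ps.Pairwise (· ≤ ·) → (∀ j ∈ junk, ∀ p ∈ ps, j < p) →
    aLoop ps (junk ++ ts) ans = ans + bLoop ps ts := by
  induction ps with
  | nil => intro junk ts ans _ _; simp [aLoop, bLoop]
  | cons p ps ih =>
    intro junk ts ans hsorted hjunk
    have hple : ∀ q ∈ ps, p ≤ q := (List.pairwise_cons.mp hsorted).1
    have hps : ps.Pairwise (· ≤ ·) := (List.pairwise_cons.mp hsorted).2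
    have hjp : ∀ j ∈ junk, j < p := fun j hj => hjunk j hj p (List.mem_cons_self ..)
    -- the junk prefix is skipped by both the find and the dropWhile
    have hdrop : (junk ++ ts).dropWhile (fun t => decide (t < p))
        = ts.dropWhile (fun t => decide (t < p)) := by
      induction junk with
      | nil => rfl
      | cons j js ihj =>
        simp only [List.cons_append, List.dropWhile]
        rw [decide_eq_true (hjp j (List.mem_cons_self ..))]
        exact ihj (fun j hj q hq => hjunk j (List.mem_cons_of_mem _ hj) q hq)
          (fun j hj => hjp j (List.mem_cons_of_mem _ hj))
    have htw : ∀ x ∈ ts.takeWhile (fun t => decide (t < p)), x < p := by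
      intro x hx; simpa using List.mem_takeWhile_imp hx
    have hfind := aFind_eq_head_dropWhile p (junk ++ ts)
    rw [hdrop] at hfind
    cases hd : ts.dropWhile (fun t => decide (t < p)) with
    | nil =>
      -- no shirt fits p (nor any later person)
      rw [hd] at hfind
      have hts : ts = ts.takeWhile (fun t => decide (t < p)) := by
        conv_lhs => rw [← List.takeWhile_append_dropWhile (p := fun t => decide (t < p)) (l := ts)]
        rw [hd, List.append_nil]
      simp only [aLoop, bLoop, hfind, List.head?_nil, hd]
      have hj' : ∀ j ∈ junk ++ ts, ∀ q ∈ ps, j < q := by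
        intro j hj q hq
        rcases List.mem_append.mp hj with h | h
        · exact lt_of_lt_of_le (hjp j h) (hple q hq)
        · rw [hts] at h; exact lt_of_lt_of_le (htw j h) (hple q hq)
      have := ih (junk ++ ts) [] ans hps hj'
      simpa using this
    | cons s rest =>
      rw [hd] at hfind
      have hsplit : ts = ts.takeWhile (fun t => decide (t < p)) ++ s :: rest := by
        conv_lhs => rw [← List.takeWhile_append_dropWhile (p := fun t => decide (t < p)) (l := ts)]
        rw [hd]
      have hps_le : p ≤ s := by
        have := List.head?_dropWhile_not (p := fun t => decide (t < p)) (l := ts)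
        rw [hd] at this; simp at this; exact this
      have hnotmem : s ∉ junk ++ ts.takeWhile (fun t => decide (t < p)) := by
        intro hmem
        rcases List.mem_append.mp hmem with h | h
        · exact absurd (lt_of_lt_of_le (hjp s h) hps_le) (lt_irrefl s)
        · exact absurd (lt_of_lt_of_le (htw s h) hps_le) (lt_irrefl s)
      have hrem : PySem.List.remove? (junk ++ ts) s
          = some ((junk ++ ts.takeWhile (fun t => decide (t < p))) ++ rest) := by
        conv_lhs => rw [hsplit, ← List.append_assoc]
        exact remove?_append_of_not_mem _ s rest hnotmem
      have hj' : ∀ j ∈ junk ++ ts.takeWhile (fun t => decide (t < p)), ∀ q ∈ ps, j < q := by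
        intro j hj q hq
        rcases List.mem_append.mp hj with h | h
        · exact lt_of_lt_of_le (hjp j h) (hple q hq)
        · exact lt_of_lt_of_le (htw j h) (hple q hq)
      simp only [aLoop, bLoop, hfind, hd, List.head?_cons, hrem, Option.getD_some]
      rw [ih (junk ++ ts.takeWhile (fun t => decide (t < p))) rest (ans + 1) hps hj']
      ring

-- ===== VERDICT (by name: the statement is the Claim_ definition above) =====
theorem solution_spec : Claim_equal_solution := by
  intro people tshirts _
  unfold Spec_solution solution solution_alt
  have := aLoop_eq_bLoop (PySem.List.sorted people (fun x => x) false) []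
    (PySem.List.sorted tshirts (fun x => x) false) 0
    (PySem.List.sorted_pairwise ..) (by simp)
  simpa using this
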